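-- pv_equiv track=rewrite | github.com/cloud-brain/algorithm | hiho/1039/code.py | max_clear_letter
-- ===== SOURCE A (Python) =====
-- def clear_letter(x):
--     x = list(x)
--     pre_char = x[0]
--     count = 0
--     i = 0
--     while i < len(x):
--         pre_char = x[i]
--         i = i + 1
--         if i >= len(x):
--             break
--         if(x[i] == pre_char):
--             end_flag = i + 1
--             while(end_flag < len(x) and x[end_flag] == pre_char):
--                 end_flag = end_flag + 1
--             del x[(i - 1):end_flag]
--             count = count + end_flag - i + 1
--             i = i - 1
--     return count
--
-- def max_clear_letter(x):
--     max_clear = 0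
--     for i in range(len(x)):
--         y = x[:i] + 'A' + x[i:]
--         max_clear = max(max_clear, clear_letter(y))
--         y = x[:i] + 'B' + x[i:]
--         max_clear = max(max_clear, clear_letter(y))
--         y = x[:i] + 'C' + x[i:]
--         max_clear = max(max_clear, clear_letter(y))
--     return max_clear
-- ===== SOURCE B (Python) =====
-- # B: per candidate insertion, count removable characters with a single
-- # run-length pass (prev char, run length, total) instead of A's mutable-list
-- # deletion loop with index backtracking and O(n) `del` slices.
--
-- def _removable(s):
--     total = 0
--     run = 0
--     prev = None
--     for ch in s:
--         if ch == prev: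
--             run += 1
--         else:
--             if run >= 2:
--                 total += run
--             prev = ch
--             run = 1
--     if run >= 2:
--         total += run
--     return total
--
-- def max_clear_letter(x):
--     n = len(x)
--     return max((_removable(x[:i] + c + x[i:]) for i in range(n) for c in "ABC"),
--                default=0)
-- ===== Notes on version B (the rewrite author's own statement) =====
-- stated objective: faster
-- what changed: clear_letter's mutable-list scan with run deletion (del slices and index backtracking) is replaced by a single stateless run-length pass summing maximal runs of length >= 2; the outer insertion loop becomes a max over a generator.
import Mathlib
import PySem

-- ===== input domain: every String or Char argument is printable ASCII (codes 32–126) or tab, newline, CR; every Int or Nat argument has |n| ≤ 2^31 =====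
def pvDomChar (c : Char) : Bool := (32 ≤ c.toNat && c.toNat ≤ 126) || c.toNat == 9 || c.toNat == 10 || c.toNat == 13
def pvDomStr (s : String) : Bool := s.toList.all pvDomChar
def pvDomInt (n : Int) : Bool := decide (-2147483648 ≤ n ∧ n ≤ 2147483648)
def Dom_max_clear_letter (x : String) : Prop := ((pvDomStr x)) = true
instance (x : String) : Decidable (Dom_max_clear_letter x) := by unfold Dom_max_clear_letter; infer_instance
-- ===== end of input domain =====

-- B replaces A's delete-runs-in-place scan by a single run-length pass per candidate
-- insertion (objective: faster; a timing run measures the actual speed-up).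

-- ===== PORT A =====
-- inner `while(end_flag < len(x) and x[end_flag] == pre_char): end_flag += 1`
def pyExtend (x : List Char) (e : Nat) (pre : Char) : Nat :=
  if h : e < x.length ∧ x.getD e ' ' = pre then pyExtend x (e + 1) pre else e
termination_by x.length - e
decreasing_by omega

theorem pyExtend_ge (x : List Char) (e : Nat) (c : Char) : e ≤ pyExtend x e c := by
  fun_induction pyExtend x e c with
  | case1 e h ih => omega
  | case2 e h => omega

theorem pyExtend_le (x : List Char) (e : Nat) (c : Char) (he : e ≤ x.length) :
    pyExtend x e c ≤ x.length := by
  fun_induction pyExtend x e c with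
  | case1 e h ih => exact ih (by omega)
  | case2 e h => exact he

-- the outer `while i < len(x)` of clear_letter; `del x[(i-1):end_flag]` is
-- `x.take i ++ x.drop e` (both bounds in range), `i = i - 1` keeps i unchanged
-- relative to the loop-top index.
def clearLoopA (x : List Char) (i : Nat) (count : Int) : Int :=
  if _h : i < x.length then
    if _h2 : i + 1 < x.length then
      if x.getD (i + 1) ' ' = x.getD i ' ' then
        let e := pyExtend x (i + 2) (x.getD i ' ')
        clearLoopA (x.take i ++ x.drop e) i (count + ((e : Int) - ((i : Int) + 1) + 1))
      else clearLoopA x (i + 1) count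
    else count
  else count
termination_by 2 * x.length - i
decreasing_by
  · have h1 := pyExtend_ge x (i + 2) (x.getD i ' ')
    have h2 := pyExtend_le x (i + 2) (x.getD i ' ') (by omega)
    simp only [List.length_append, List.length_take, List.length_drop]
    omega
  · omega

-- clear_letter(y): the initial `pre_char = x[0]` read is dead (every call site
-- passes a non-empty string, and the value is overwritten before use).
def clearLetterA (x : List Char) : Int := clearLoopA x 0 0

def max_clear_letter (x : String) : Int :=
  let l := x.toList
  (List.range l.length).foldl (fun m i =>
    let m := max m (clearLetterA (l.take i ++ 'A' :: l.drop i))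
    let m := max m (clearLetterA (l.take i ++ 'B' :: l.drop i))
    max m (clearLetterA (l.take i ++ 'C' :: l.drop i))) 0

-- ===== PORT B =====
-- Source B _removable: one pass tracking (prev char, current run length, total)
def srgLoop (s : List Char) (prev : Option Char) (run : Int) (total : Int) : Int :=
  match s with
  | [] => if 2 ≤ run then total + run else total
  | c :: rest =>
    if some c = prev then srgLoop rest prev (run + 1) total
    else srgLoop rest (some c) 1 (if 2 ≤ run then total + run else total)

def removable (s : List Char) : Int := srgLoop s none 0 0

-- max(generator, default=0): fold max over the generated values starting at 0
-- (exact here: every generated value is ≥ 0)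
def max_clear_letter_alt (x : String) : Int :=
  let l := x.toList
  ((List.range l.length).flatMap (fun i =>
    ['A', 'B', 'C'].map (fun c => removable (l.take i ++ c :: l.drop i)))).foldl max 0

-- ===== PRECONDITION & SPEC =====
def Spec_max_clear_letter (x : String) (out : Int) : Prop := out = max_clear_letter_alt x
instance (x : String) (out : Int) : Decidable (Spec_max_clear_letter x out) := by unfold Spec_max_clear_letter; infer_instance

-- ===== CLAIM (what is proved, stated in full; the proofs are below) =====
def Claim_equal_max_clear_letter : Prop := ∀ (x : String), Dom_max_clear_letter x → Spec_max_clear_letter x (max_clear_letter x)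

-- ===== LEMMAS AND PROOFS =====

-- number of leading occurrences of `a`
def countLead (a : Char) : List Char → Nat
  | [] => 0
  | c :: t => if c = a then countLead a t + 1 else 0

-- reference value: sum of the lengths of the maximal runs of length ≥ 2
def R : List Char → Int
  | [] => 0
  | a :: t =>
    (if 2 ≤ 1 + (countLead a t : Int) then 1 + (countLead a t : Int) else 0)
      + R (t.drop (countLead a t))
termination_by l => l.length
decreasing_by simp only [List.length_drop, List.length_cons]; omega

theorem pyExtend_eq_countLead (x : List Char) (e : Nat) (c : Char) (he : e ≤ x.length) :
    pyExtend x e c = e + countLead c (x.drop e) := by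
  fun_induction pyExtend x e c with
  | case1 e h ih =>
    obtain ⟨hlt, hc⟩ := h
    rw [ih (by omega)]
    rw [List.drop_eq_getElem_cons hlt]
    rw [List.getD_eq_getElem x ' ' hlt] at hc
    simp [countLead, hc]
    omega
  | case2 e h =>
    rcases Nat.lt_or_ge e x.length with hlt | hge
    · rw [List.drop_eq_getElem_cons hlt]
      have hc : ¬ x.getD e ' ' = c := fun hh => h ⟨hlt, hh⟩
      rw [List.getD_eq_getElem x ' ' hlt] at hc
      simp [countLead, hc]
    · rw [List.drop_eq_nil_of_le hge]
      simp [countLead]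

theorem clearLoopA_eq (x : List Char) (i : Nat) (count : Int) :
    clearLoopA x i count = count + R (x.drop i) := by
  fun_induction clearLoopA x i count with
  | case1 x i count h h2 hc e ih =>
    -- deletion branch
    have hi2 : i + 2 ≤ x.length := by omega
    have hext : e = i + 2 + countLead (x.getD i ' ') (x.drop (i + 2)) :=
      pyExtend_eq_countLead x (i + 2) (x.getD i ' ') hi2
    have hlen : (x.take i).length = i := by simp; omega
    rw [ih]
    have hdrop : (x.take i ++ x.drop e).drop i = x.drop e := by
      rw [List.drop_append_of_le_length (by omega), List.drop_eq_nil_of_le (by omega)]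
      simp
    rw [hdrop]
    -- unfold R on x.drop i
    have hx1 : x.drop i = x[i] :: x.drop (i + 1) := List.drop_eq_getElem_cons h
    have hx2 : x.drop (i + 1) = x[i + 1] :: x.drop (i + 2) := List.drop_eq_getElem_cons h2
    simp only [List.getD_eq_getElem x ' ' h2, List.getD_eq_getElem x ' ' h] at hc hext
    rw [hx1, R]
    have hm : countLead x[i] (x.drop (i + 1)) = 1 + countLead x[i] (x.drop (i + 2)) := by
      rw [hx2]; simp only [countLead]
      split_ifs with hgood
      · omega
      · exact absurd hc hgood
    rw [hm]
    set m2 := countLead x[i] (x.drop (i + 2)) with hm2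
    have hdd : (x.drop (i + 1)).drop (1 + m2) = x.drop e := by
      rw [List.drop_drop]
      congr 1
      omega
    rw [hdd]
    have : (2 : Int) ≤ 1 + ((1 + m2 : Nat) : Int) := by push_cast; omega
    rw [if_pos this]
    push_cast
    have : (e : Int) = (i : Int) + 2 + (m2 : Int) := by rw [hext]; push_cast; ring
    rw [this]
    ring
  | case2 x i count h h2 hc ih =>
    -- x[i+1] ≠ x[i]: skip
    rw [ih]
    have hx1 : x.drop i = x[i] :: x.drop (i + 1) := List.drop_eq_getElem_cons h
    have hx2 : x.drop (i + 1) = x[i + 1] :: x.drop (i + 2) := List.drop_eq_getElem_cons h2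
    simp only [List.getD_eq_getElem x ' ' h2, List.getD_eq_getElem x ' ' h] at hc
    rw [hx1, R]
    have hm : countLead x[i] (x.drop (i + 1)) = 0 := by
      rw [hx2]; simp [countLead, hc]
    rw [hm]
    simp
  | case3 x i count h h2 =>
    -- i is the last index
    have hx1 : x.drop i = x[i] :: x.drop (i + 1) := List.drop_eq_getElem_cons h
    rw [hx1, List.drop_eq_nil_of_le (by omega : x.length ≤ i + 1)]
    simp [R, countLead]
  | case4 x i count h =>
    rw [List.drop_eq_nil_of_le (by omega)]
    simp [R]

theorem srgLoop_run (t : List Char) : ∀ (a : Char) (k total : Int), 1 ≤ k →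
    srgLoop t (some a) k total =
      total + (if 2 ≤ k + (countLead a t : Int) then k + (countLead a t : Int) else 0)
            + R (t.drop (countLead a t)) := by
  induction t with
  | nil =>
    intro a k total hk
    simp only [srgLoop, countLead, List.drop_nil, R]
    split_ifs with h1 h2 h2 <;> push_cast at * <;> omega
  | cons c r ih =>
    intro a k total hk
    by_cases hca : c = a
    · subst hca
      have hstep : srgLoop (c :: r) (some c) k total = srgLoop r (some c) (k + 1) total := by
        simp [srgLoop]
      rw [hstep, ih c (k + 1) total (by omega)]
      have hm : countLead c (c :: r) = countLead c r + 1 := by simp [countLead]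
      have hd : (c :: r).drop (countLead c r + 1) = r.drop (countLead c r) := by
        simp [List.drop_succ_cons]
      rw [hm, hd]
      generalize R (r.drop (countLead c r)) = Z
      push_cast
      split_ifs <;> omega
    · have hne : ¬ (some c = some a) := by simp [hca]
      simp only [srgLoop, if_neg hne]
      rw [ih c 1 _ (by omega)]
      have hm0 : countLead a (c :: r) = 0 := by simp [countLead, hca]
      rw [hm0]
      simp only [List.drop_zero, Nat.cast_zero, add_zero]
      rw [show ((c :: r) : List Char) = c :: r from rfl, R]
      generalize R (r.drop (countLead c r)) = Z
      split_ifs <;> omega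

theorem removable_eq_R (l : List Char) : removable l = R l := by
  cases l with
  | nil => simp [removable, srgLoop, R]
  | cons a t =>
    show srgLoop (a :: t) none 0 0 = R (a :: t)
    have h0 : ¬ (some a = (none : Option Char)) := by simp
    simp only [srgLoop, if_neg h0]
    rw [srgLoop_run t a 1 _ (by omega)]
    rw [R]
    norm_num

theorem clearLetterA_eq_removable (l : List Char) : clearLetterA l = removable l := by
  rw [clearLetterA, clearLoopA_eq, removable_eq_R]
  simp

theorem foldl_flatMap_three (g : Nat → Char → Int) (rs : List Nat) :
    ∀ acc : Int,
      ((rs.flatMap (fun i => ['A', 'B', 'C'].map (fun c => g i c))).foldl max acc) =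
      rs.foldl (fun m i => max (max (max m (g i 'A')) (g i 'B')) (g i 'C')) acc := by
  induction rs with
  | nil => intro acc; rfl
  | cons r rs ih =>
    intro acc
    simp only [List.flatMap_cons, List.map_cons, List.map_nil, List.foldl_append,
      List.foldl_cons, List.foldl_nil]
    exact ih _

-- ===== VERDICT (by name: the statement is the Claim_ definition above) =====
theorem max_clear_letter_spec : Claim_equal_max_clear_letter := by
  intro x _
  unfold Spec_max_clear_letter max_clear_letter max_clear_letter_alt
  rw [foldl_flatMap_three (fun i c => removable (x.toList.take i ++ c :: x.toList.drop i))]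
  simp only [clearLetterA_eq_removable]
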